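-- pv_equiv track=rewrite | github.com/earth-metabolome-initiative/emi-monorepo | web/backend/constraint_checkers/find_foreign_keys.py | postgres_type_to_diesel_type
-- ===== SOURCE A (Python) =====
-- def postgres_type_to_diesel_type(postgres_type: str) -> str:
--     """Converts a Postgres type to a Diesel type.
--
--     Parameters
--     ----------
--     postgres_type : str
--         The Postgres type.
--     """
--     if postgres_type == "integer":
--         return "diesel::sql_types::Integer"
--     if postgres_type == "text":
--         return "diesel::sql_types::Text"
--     if postgres_type in ("timestamp without time zone", "timestamp with time zone"):
--         return "diesel::sql_types::Timestamp"
--     if postgres_type in ("time without time zone", "time with time zone"):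
--         return "diesel::sql_types::Time"
--     if postgres_type == "uuid":
--         return "diesel::sql_types::Uuid"
--     if postgres_type == "boolean":
--         return "diesel::sql_types::Bool"
--     if postgres_type == "real":
--         return "diesel::sql_types::Float"
--     if postgres_type == "double precision":
--         return "diesel::sql_types::Double"
--     if postgres_type == "character varying":
--         return "diesel::sql_types::Text"
--     if postgres_type in ("char", "character"):
--         return "diesel::sql_types::CChar"
--     if postgres_type == "bytea":
--         return "diesel::sql_types::Binary"
--     if postgres_type == "json":
--         return "diesel::sql_types::Json"
--     if postgres_type == "jsonb":
--         return "diesel::sql_types::Jsonb"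
--     if postgres_type == "macaddr":
--         return "diesel::sql_types::MacAddr"
--     if postgres_type == "inet":
--         return "diesel::sql_types::Inet"
--     if postgres_type == "numeric":
--         return "diesel::sql_types::Numeric"
--     if postgres_type == "oid":
--         return "diesel::sql_types::Oid"
--     if postgres_type == "smallint":
--         return "diesel::sql_types::SmallInt"
--     if postgres_type == "bigint":
--         return "diesel::sql_types::BigInt"
--     if postgres_type == "cstring":
--         return "diesel::sql_types::Text"
--     if postgres_type == "interval":
--         return "diesel::sql_types::Interval"
--     if postgres_type == "date":
--         return "diesel::sql_types::Date"
--     if postgres_type == "money":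
--         return "diesel::pg::sql_types::Money"
--     if postgres_type == "geometry":
--         return "postgis_diesel::sql_types::Geometry"
--     if postgres_type == "geography":
--         return "postgis_diesel::sql_types::Geography"
--     if postgres_type == "point":
--         return "postgis_diesel::sql_types::Geometry"
--         # return "postgis_diesel::types::Point"
--     if postgres_type == "line":
--         return "postgis_diesel::sql_types::Geometry"
--         # return "postgis_diesel::types::LineString"
--     if postgres_type == "lseg":
--         return "postgis_diesel::sql_types::Geometry"
--         # return "postgis_diesel::types::LineString"
--     if postgres_type == "polygon":
--         return "postgis_diesel::sql_types::Geometry"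
--         # return "postgis_diesel::types::Polygon<postgis_diesel::types::Point>"
--     if postgres_type == "tsvector":
--         return "diesel_full_text_search::TsVector"
--     if postgres_type == "tsquery":
--         return "diesel_full_text_search::TsQuery"
--
--     # Here we handle the recursive case of arrays.
--     if postgres_type.endswith("[]"):
--         return f"diesel::pg::sql_types::Array<{postgres_type_to_diesel_type(postgres_type[:-2])}>"
--
--     raise NotImplementedError(f"Unknown Postgres type: '{postgres_type}'")
-- ===== SOURCE B (Python) =====
-- # Table-driven rewrite: one dict lookup after stripping trailing "[]" suffixes,
-- # then iterative Array<...> wrapping (instead of A's 30-branch if-chain with recursion).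
--
-- _DIESEL_TYPES = {
--     "integer": "diesel::sql_types::Integer",
--     "text": "diesel::sql_types::Text",
--     "timestamp without time zone": "diesel::sql_types::Timestamp",
--     "timestamp with time zone": "diesel::sql_types::Timestamp",
--     "time without time zone": "diesel::sql_types::Time",
--     "time with time zone": "diesel::sql_types::Time",
--     "uuid": "diesel::sql_types::Uuid",
--     "boolean": "diesel::sql_types::Bool",
--     "real": "diesel::sql_types::Float",
--     "double precision": "diesel::sql_types::Double",
--     "character varying": "diesel::sql_types::Text",
--     "char": "diesel::sql_types::CChar",
--     "character": "diesel::sql_types::CChar",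
--     "bytea": "diesel::sql_types::Binary",
--     "json": "diesel::sql_types::Json",
--     "jsonb": "diesel::sql_types::Jsonb",
--     "macaddr": "diesel::sql_types::MacAddr",
--     "inet": "diesel::sql_types::Inet",
--     "numeric": "diesel::sql_types::Numeric",
--     "oid": "diesel::sql_types::Oid",
--     "smallint": "diesel::sql_types::SmallInt",
--     "bigint": "diesel::sql_types::BigInt",
--     "cstring": "diesel::sql_types::Text",
--     "interval": "diesel::sql_types::Interval",
--     "date": "diesel::sql_types::Date",
--     "money": "diesel::pg::sql_types::Money",
--     "geometry": "postgis_diesel::sql_types::Geometry",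
--     "geography": "postgis_diesel::sql_types::Geography",
--     "point": "postgis_diesel::sql_types::Geometry",
--     "line": "postgis_diesel::sql_types::Geometry",
--     "lseg": "postgis_diesel::sql_types::Geometry",
--     "polygon": "postgis_diesel::sql_types::Geometry",
--     "tsvector": "diesel_full_text_search::TsVector",
--     "tsquery": "diesel_full_text_search::TsQuery",
-- }
--
--
-- def postgres_type_to_diesel_type(postgres_type: str) -> str:
--     """Converts a Postgres type to a Diesel type."""
--     base = postgres_type
--     depth = 0
--     while base.endswith("[]"):
--         base = base[:-2]
--         depth += 1
--     try:
--         result = _DIESEL_TYPES[base]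
--     except KeyError:
--         raise NotImplementedError(f"Unknown Postgres type: '{base}'")
--     for _ in range(depth):
--         result = f"diesel::pg::sql_types::Array<{result}>"
--     return result
-- ===== Notes on version B (the rewrite author's own statement) =====
-- stated objective: simpler
-- what changed: Replaces A's 30-branch if-chain with self-recursion on the array suffix by a module-level dict lookup after an iterative loop that strips trailing '[]' suffixes into a depth counter, then wraps the result in Array<...> depth times.
import Mathlib
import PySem

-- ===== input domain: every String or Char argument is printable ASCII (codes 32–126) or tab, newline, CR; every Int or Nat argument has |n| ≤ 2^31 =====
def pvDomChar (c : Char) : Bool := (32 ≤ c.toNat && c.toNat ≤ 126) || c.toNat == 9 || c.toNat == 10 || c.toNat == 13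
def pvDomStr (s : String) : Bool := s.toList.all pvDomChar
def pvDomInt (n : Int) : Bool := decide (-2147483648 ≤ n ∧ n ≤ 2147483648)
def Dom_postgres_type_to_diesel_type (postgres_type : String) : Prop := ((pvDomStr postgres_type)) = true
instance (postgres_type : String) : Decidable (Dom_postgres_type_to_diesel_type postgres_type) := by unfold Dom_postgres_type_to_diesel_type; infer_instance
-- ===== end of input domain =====

set_option maxHeartbeats 1000000


-- B replaces A's 30-branch if-chain with recursion by a table lookup after iteratively
-- stripping trailing "[]" suffixes, then iterative Array<...> wrapping (objective: simpler).
-- Return-value equivalence on inputs where A returns (both raise NotImplementedError on the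
-- same inputs; those are outside Pre_).

-- ===== PORT A =====
-- A's chain of ifs, with a fuel argument (fuel = length of the string) only to make the
-- recursion on postgres_type[:-2] structurally terminating; the '""' arms are the
-- NotImplementedError / exhausted-fuel cases, both excluded by Pre_.
def pvAgo (fuel : Nat) (l : List Char) : String :=
  if l = "integer".toList then "diesel::sql_types::Integer"
  else if l = "text".toList then "diesel::sql_types::Text"
  else if l = "timestamp without time zone".toList ∨ l = "timestamp with time zone".toList then "diesel::sql_types::Timestamp"
  else if l = "time without time zone".toList ∨ l = "time with time zone".toList then "diesel::sql_types::Time"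
  else if l = "uuid".toList then "diesel::sql_types::Uuid"
  else if l = "boolean".toList then "diesel::sql_types::Bool"
  else if l = "real".toList then "diesel::sql_types::Float"
  else if l = "double precision".toList then "diesel::sql_types::Double"
  else if l = "character varying".toList then "diesel::sql_types::Text"
  else if l = "char".toList ∨ l = "character".toList then "diesel::sql_types::CChar"
  else if l = "bytea".toList then "diesel::sql_types::Binary"
  else if l = "json".toList then "diesel::sql_types::Json"
  else if l = "jsonb".toList then "diesel::sql_types::Jsonb"
  else if l = "macaddr".toList then "diesel::sql_types::MacAddr"
  else if l = "inet".toList then "diesel::sql_types::Inet"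
  else if l = "numeric".toList then "diesel::sql_types::Numeric"
  else if l = "oid".toList then "diesel::sql_types::Oid"
  else if l = "smallint".toList then "diesel::sql_types::SmallInt"
  else if l = "bigint".toList then "diesel::sql_types::BigInt"
  else if l = "cstring".toList then "diesel::sql_types::Text"
  else if l = "interval".toList then "diesel::sql_types::Interval"
  else if l = "date".toList then "diesel::sql_types::Date"
  else if l = "money".toList then "diesel::pg::sql_types::Money"
  else if l = "geometry".toList then "postgis_diesel::sql_types::Geometry"
  else if l = "geography".toList then "postgis_diesel::sql_types::Geography"
  else if l = "point".toList then "postgis_diesel::sql_types::Geometry"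
  else if l = "line".toList then "postgis_diesel::sql_types::Geometry"
  else if l = "lseg".toList then "postgis_diesel::sql_types::Geometry"
  else if l = "polygon".toList then "postgis_diesel::sql_types::Geometry"
  else if l = "tsvector".toList then "diesel_full_text_search::TsVector"
  else if l = "tsquery".toList then "diesel_full_text_search::TsQuery"
  else if PySem.Chars.endswith l ("[]".toList) then
    match fuel with
    | 0 => ""
    | f + 1 => "diesel::pg::sql_types::Array<" ++ pvAgo f (PySem.List.slice l none (some (-2))) ++ ">"
  else ""

def postgres_type_to_diesel_type (postgres_type : String) : String :=
  pvAgo postgres_type.toList.length postgres_type.toList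

-- ===== PORT B =====
-- the module-level dict of Source B, groups expanded to individual keys
def pvTable : List (List Char × String) :=
  [("integer".toList, "diesel::sql_types::Integer"),
   ("text".toList, "diesel::sql_types::Text"),
   ("timestamp without time zone".toList, "diesel::sql_types::Timestamp"),
   ("timestamp with time zone".toList, "diesel::sql_types::Timestamp"),
   ("time without time zone".toList, "diesel::sql_types::Time"),
   ("time with time zone".toList, "diesel::sql_types::Time"),
   ("uuid".toList, "diesel::sql_types::Uuid"),
   ("boolean".toList, "diesel::sql_types::Bool"),
   ("real".toList, "diesel::sql_types::Float"),
   ("double precision".toList, "diesel::sql_types::Double"),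
   ("character varying".toList, "diesel::sql_types::Text"),
   ("char".toList, "diesel::sql_types::CChar"),
   ("character".toList, "diesel::sql_types::CChar"),
   ("bytea".toList, "diesel::sql_types::Binary"),
   ("json".toList, "diesel::sql_types::Json"),
   ("jsonb".toList, "diesel::sql_types::Jsonb"),
   ("macaddr".toList, "diesel::sql_types::MacAddr"),
   ("inet".toList, "diesel::sql_types::Inet"),
   ("numeric".toList, "diesel::sql_types::Numeric"),
   ("oid".toList, "diesel::sql_types::Oid"),
   ("smallint".toList, "diesel::sql_types::SmallInt"),
   ("bigint".toList, "diesel::sql_types::BigInt"),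
   ("cstring".toList, "diesel::sql_types::Text"),
   ("interval".toList, "diesel::sql_types::Interval"),
   ("date".toList, "diesel::sql_types::Date"),
   ("money".toList, "diesel::pg::sql_types::Money"),
   ("geometry".toList, "postgis_diesel::sql_types::Geometry"),
   ("geography".toList, "postgis_diesel::sql_types::Geography"),
   ("point".toList, "postgis_diesel::sql_types::Geometry"),
   ("line".toList, "postgis_diesel::sql_types::Geometry"),
   ("lseg".toList, "postgis_diesel::sql_types::Geometry"),
   ("polygon".toList, "postgis_diesel::sql_types::Geometry"),
   ("tsvector".toList, "diesel_full_text_search::TsVector"),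
   ("tsquery".toList, "diesel_full_text_search::TsQuery")]

-- dict lookup (first match)
def pvAssoc (l : List Char) : List (List Char × String) → Option String
  | [] => none
  | (k, v) :: rest => if l = k then some v else pvAssoc l rest

-- Source B's while loop: strip trailing "[]" suffixes, counting the depth
-- (fuel = string length only makes the loop structurally terminating; never exhausted,
-- since each iteration removes two characters)
def pvStrip (fuel : Nat) (l : List Char) : List Char × Nat :=
  match fuel with
  | 0 => (l, 0)
  | f + 1 =>
    if PySem.Chars.endswith l ("[]".toList) = true then
      let p := pvStrip f (PySem.List.slice l none (some (-2)))
      (p.1, p.2 + 1)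
    else (l, 0)

-- Source B's for loop wrapping the result depth times
def pvWrap : Nat → String → String
  | 0, r => r
  | n + 1, r => pvWrap n ("diesel::pg::sql_types::Array<" ++ r ++ ">")

def postgres_type_to_diesel_type_alt (postgres_type : String) : String :=
  let p := pvStrip postgres_type.toList.length postgres_type.toList
  match pvAssoc p.1 pvTable with
  | some r => pvWrap p.2 r
  | none => ""   -- Source B raises NotImplementedError here (outside Pre_)

-- ===== PRECONDITION & SPEC =====
-- Pre_ excludes exactly the inputs on which A (and B) raise NotImplementedError:
-- the admitted inputs are a known key followed by zero or more "[]" suffixes.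
def Pre_postgres_type_to_diesel_type (postgres_type : String) : Prop :=
  ∃ d ∈ List.range (postgres_type.toList.length + 1), ∃ key ∈ pvTable.map Prod.fst,
    postgres_type.toList = key ++ (List.replicate d ['[', ']']).flatten
instance (postgres_type : String) : Decidable (Pre_postgres_type_to_diesel_type postgres_type) := by
  unfold Pre_postgres_type_to_diesel_type; infer_instance

def pvWitness_postgres_type_to_diesel_type : String := "integer[]"

def Spec_postgres_type_to_diesel_type (postgres_type : String) (out : String) : Prop := out = postgres_type_to_diesel_type_alt postgres_type
instance (postgres_type : String) (out : String) : Decidable (Spec_postgres_type_to_diesel_type postgres_type out) := by unfold Spec_postgres_type_to_diesel_type; infer_instance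

-- ===== CLAIM (what is proved, stated in full; the proofs are below) =====
def Claim_equal_postgres_type_to_diesel_type : Prop := ∀ (postgres_type : String), Dom_postgres_type_to_diesel_type postgres_type → Pre_postgres_type_to_diesel_type postgres_type → Spec_postgres_type_to_diesel_type postgres_type (postgres_type_to_diesel_type postgres_type)

-- ===== LEMMAS AND PROOFS =====

-- a string ending in "[]" has length ≥ 2
theorem pvEndswith_two_le (l : List Char) (h : PySem.Chars.endswith l ("[]".toList) = true) :
    2 ≤ l.length := by
  have := (PySem.Chars.endswith_iff l ("[]".toList)).mp h
  simpa using this.length_le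


theorem pvFlattenRep_len (d : Nat) :
    ((List.replicate d (['[', ']'] : List Char)).flatten).length = 2 * d := by
  induction d with
  | zero => rfl
  | succ n ih => simp only [List.replicate_succ, List.flatten_cons, List.length_append, ih,
      List.length_cons, List.length_nil]; omega

theorem pvRep_succ' (d : Nat) :
    (List.replicate (d + 1) (['[', ']'] : List Char)).flatten
      = (List.replicate d (['[', ']'] : List Char)).flatten ++ ['[', ']'] := by
  rw [List.replicate_succ']
  simp

-- stripping a key followed by d bracket pairs yields (key, d)
theorem pvStripKey (d : Nat) (key : List Char)
    (hk : PySem.Chars.endswith key ("[]".toList) = false) :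
    ∀ fuel, key.length + 2 * d ≤ fuel →
      pvStrip fuel (key ++ (List.replicate d ['[', ']']).flatten) = (key, d) := by
  induction d with
  | zero =>
    intro fuel _
    simp only [List.replicate, List.flatten_nil, List.append_nil]
    cases fuel with
    | zero => rfl
    | succ f =>
      have hk' : PySem.Chars.endswith key ['[', ']'] = false := hk
      simp [pvStrip, hk']
  | succ n ih =>
    intro fuel hf
    obtain ⟨f, rfl⟩ : ∃ f, fuel = f + 1 := ⟨fuel - 1, by omega⟩
    have hsplit : key ++ (List.replicate (n + 1) (['[', ']'] : List Char)).flatten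
        = (key ++ (List.replicate n ['[', ']']).flatten) ++ ['[', ']'] := by
      rw [pvRep_succ', List.append_assoc]
    have hE : PySem.Chars.endswith (key ++ (List.replicate (n + 1) ['[', ']']).flatten)
        ("[]".toList) = true := by
      rw [hsplit]
      exact (PySem.Chars.endswith_iff _ _).mpr ⟨_, rfl⟩
    have hlen : (key ++ (List.replicate (n + 1) ['[', ']']).flatten : List Char).length
        = key.length + 2 * (n + 1) := by
      simp [pvFlattenRep_len]
      omega
    have hslice : PySem.List.slice (key ++ (List.replicate (n + 1) ['[', ']']).flatten)
        none (some (-2)) = key ++ (List.replicate n ['[', ']']).flatten := by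
      rw [PySem.List.slice_to_neg_ofNat _ 2 (by omega), hlen, hsplit]
      rw [show key.length + 2 * (n + 1) - 2
            = (key ++ (List.replicate n (['[', ']'] : List Char)).flatten).length by
          simp [pvFlattenRep_len]; omega]
      exact List.take_left
    simp only [pvStrip, hE, if_true, hslice]
    rw [ih f (by omega)]

-- lookup hits imply membership; misses imply l is none of the keys
theorem pvAssoc_mem (l : List Char) (r : String) (t : List (List Char × String))
    (h : pvAssoc l t = some r) : (l, r) ∈ t := by
  induction t with
  | nil => simp [pvAssoc] at h
  | cons kv rest ih =>
    obtain ⟨k, v⟩ := kv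
    simp only [pvAssoc] at h
    split_ifs at h with hc
    · cases h; subst hc; exact List.mem_cons_self ..
    · exact List.mem_cons_of_mem _ (ih h)

theorem pvAssoc_none (l : List Char) (t : List (List Char × String))
    (h : pvAssoc l t = none) : ∀ k v, (k, v) ∈ t → l ≠ k := by
  induction t with
  | nil => simp
  | cons kv rest ih =>
    obtain ⟨k0, v0⟩ := kv
    intro k v hm
    simp only [pvAssoc] at h
    split_ifs at h with hc
    rcases List.mem_cons.mp hm with he | hm'
    · cases he; exact hc
    · exact ih h k v hm'

-- when lookup hits, A's if-chain returns the same value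
theorem pvAgo_hit (fuel : Nat) (l : List Char) (r : String)
    (h : pvAssoc l pvTable = some r) : pvAgo fuel l = r := by
  have hm := pvAssoc_mem l r pvTable h
  fin_cases hm <;> rw [pvAgo.eq_def] <;> rfl

-- when lookup misses, A's if-chain falls through to the array / error branch
theorem pvAgo_miss_succ (f : Nat) (l : List Char)
    (h : pvAssoc l pvTable = none)
    (hE : PySem.Chars.endswith l ("[]".toList) = true) :
    pvAgo (f + 1) l =
      "diesel::pg::sql_types::Array<" ++ pvAgo f (PySem.List.slice l none (some (-2))) ++ ">" := by
  have hne := pvAssoc_none l pvTable h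
  rw [pvAgo.eq_def,
    if_neg (hne "integer".toList "diesel::sql_types::Integer" (by decide)),
    if_neg (hne "text".toList "diesel::sql_types::Text" (by decide)),
    if_neg (not_or.mpr ⟨hne "timestamp without time zone".toList "diesel::sql_types::Timestamp" (by decide), hne "timestamp with time zone".toList "diesel::sql_types::Timestamp" (by decide)⟩),
    if_neg (not_or.mpr ⟨hne "time without time zone".toList "diesel::sql_types::Time" (by decide), hne "time with time zone".toList "diesel::sql_types::Time" (by decide)⟩),
    if_neg (hne "uuid".toList "diesel::sql_types::Uuid" (by decide)),
    if_neg (hne "boolean".toList "diesel::sql_types::Bool" (by decide)),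
    if_neg (hne "real".toList "diesel::sql_types::Float" (by decide)),
    if_neg (hne "double precision".toList "diesel::sql_types::Double" (by decide)),
    if_neg (hne "character varying".toList "diesel::sql_types::Text" (by decide)),
    if_neg (not_or.mpr ⟨hne "char".toList "diesel::sql_types::CChar" (by decide), hne "character".toList "diesel::sql_types::CChar" (by decide)⟩),
    if_neg (hne "bytea".toList "diesel::sql_types::Binary" (by decide)),
    if_neg (hne "json".toList "diesel::sql_types::Json" (by decide)),
    if_neg (hne "jsonb".toList "diesel::sql_types::Jsonb" (by decide)),
    if_neg (hne "macaddr".toList "diesel::sql_types::MacAddr" (by decide)),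
    if_neg (hne "inet".toList "diesel::sql_types::Inet" (by decide)),
    if_neg (hne "numeric".toList "diesel::sql_types::Numeric" (by decide)),
    if_neg (hne "oid".toList "diesel::sql_types::Oid" (by decide)),
    if_neg (hne "smallint".toList "diesel::sql_types::SmallInt" (by decide)),
    if_neg (hne "bigint".toList "diesel::sql_types::BigInt" (by decide)),
    if_neg (hne "cstring".toList "diesel::sql_types::Text" (by decide)),
    if_neg (hne "interval".toList "diesel::sql_types::Interval" (by decide)),
    if_neg (hne "date".toList "diesel::sql_types::Date" (by decide)),
    if_neg (hne "money".toList "diesel::pg::sql_types::Money" (by decide)),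
    if_neg (hne "geometry".toList "postgis_diesel::sql_types::Geometry" (by decide)),
    if_neg (hne "geography".toList "postgis_diesel::sql_types::Geography" (by decide)),
    if_neg (hne "point".toList "postgis_diesel::sql_types::Geometry" (by decide)),
    if_neg (hne "line".toList "postgis_diesel::sql_types::Geometry" (by decide)),
    if_neg (hne "lseg".toList "postgis_diesel::sql_types::Geometry" (by decide)),
    if_neg (hne "polygon".toList "postgis_diesel::sql_types::Geometry" (by decide)),
    if_neg (hne "tsvector".toList "diesel_full_text_search::TsVector" (by decide)),
    if_neg (hne "tsquery".toList "diesel_full_text_search::TsQuery" (by decide)),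
    if_pos hE]

theorem pvWrap_succ (n : Nat) (r : String) :
    pvWrap (n + 1) r = "diesel::pg::sql_types::Array<" ++ pvWrap n r ++ ">" := by
  induction n generalizing r with
  | zero => rfl
  | succ m ih => rw [pvWrap]; rw [ih]; rfl

theorem pvMain (fuel : Nat) (l : List Char) (hf : l.length ≤ fuel) (r : String)
    (h : pvAssoc (pvStrip fuel l).1 pvTable = some r) :
    pvAgo fuel l = pvWrap (pvStrip fuel l).2 r := by
  induction fuel generalizing l with
  | zero =>
    have hE : PySem.Chars.endswith l ("[]".toList) = false := by
      by_contra hc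
      have := pvEndswith_two_le l (by simpa using hc)
      omega
    have hS : pvStrip 0 l = (l, 0) := rfl
    rw [hS] at h ⊢
    rw [pvAgo_hit 0 l r h]
    rfl
  | succ f ih =>
    by_cases hE : PySem.Chars.endswith l ("[]".toList) = true
    · -- array case: A is in the recursive branch, strip counted one level
      have hlook : pvAssoc l pvTable = none := by
        cases hl : pvAssoc l pvTable with
        | none => rfl
        | some r' =>
          have hm := pvAssoc_mem l r' pvTable hl
          have : PySem.Chars.endswith l ("[]".toList) = false := by fin_cases hm <;> decide
          rw [hE] at this; cases this
      have h2 := pvEndswith_two_le l hE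
      have hslice : (PySem.List.slice l none (some (-2))).length = l.length - 2 := by
        rw [PySem.List.slice_to_neg_ofNat l 2 (by omega)]
        simp [List.length_take]
      have hS : pvStrip (f + 1) l = ((pvStrip f (PySem.List.slice l none (some (-2)))).1,
          (pvStrip f (PySem.List.slice l none (some (-2)))).2 + 1) := by
        rw [pvStrip.eq_def]
        simp only [hE, if_true]
      rw [hS] at h
      rw [pvAgo_miss_succ f l hlook hE, ih (PySem.List.slice l none (some (-2))) (by omega) h, hS]
      exact (pvWrap_succ (pvStrip f (PySem.List.slice l none (some (-2)))).2 r).symm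
    · -- scalar case: strip does nothing, lookup hits
      have hE' : PySem.Chars.endswith l ("[]".toList) = false := by
        simpa using hE
      have hS : pvStrip (f + 1) l = (l, 0) := by
        rw [pvStrip.eq_def]
        simp only [hE']
        rfl
      rw [hS] at h ⊢
      rw [pvAgo_hit (f + 1) l r h]
      rfl

-- a key of the table always has a lookup value
theorem pvAssoc_isSome (l : List Char) (t : List (List Char × String))
    (h : l ∈ t.map Prod.fst) : ∃ r, pvAssoc l t = some r := by
  induction t with
  | nil => simp at h
  | cons kv rest ih =>
    obtain ⟨k0, v0⟩ := kv
    simp only [pvAssoc]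
    by_cases hc : l = k0
    · exact ⟨v0, if_pos hc⟩
    · rw [if_neg hc]
      rcases List.mem_cons.mp h with he | hm'
      · exact absurd he hc
      · exact ih hm'

-- ===== VERDICT (by name: the statement is the Claim_ definition above) =====
theorem postgres_type_to_diesel_type_spec : Claim_equal_postgres_type_to_diesel_type := by
  intro s _ hPre
  unfold Spec_postgres_type_to_diesel_type
  unfold Pre_postgres_type_to_diesel_type at hPre
  obtain ⟨d, _, key, hkmem, heq⟩ := hPre
  have hk : PySem.Chars.endswith key ("[]".toList) = false := by
    obtain ⟨kv, hkv, rfl⟩ := List.mem_map.mp hkmem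
    fin_cases hkv <;> decide
  obtain ⟨r, hr⟩ := pvAssoc_isSome key pvTable hkmem
  have hlen : s.toList.length = key.length + 2 * d := by
    rw [heq]; simp [pvFlattenRep_len]; omega
  have hstrip : pvStrip s.toList.length s.toList = (key, d) := by
    rw [heq] at hlen ⊢
    exact pvStripKey d key hk _ (by omega)
  have h : pvAssoc (pvStrip s.toList.length s.toList).1 pvTable = some r := by
    rw [hstrip]; exact hr
  unfold postgres_type_to_diesel_type
  rw [pvMain s.toList.length s.toList le_rfl r h]
  simp only [postgres_type_to_diesel_type_alt, h]
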